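-- pv_equiv track=rewrite | github.com/Ledvin25/Personal | TEC/Semestre 1/Taller/Tareas/Tarea7_Ledvin_Manuel_Leiva_Mata.py | ele_c_helper
-- ===== SOURCE A (Python) =====
-- def ele_c_helper(matriz, inicio, final, lista):
--     if inicio == final:
--         return lista
--     else:
--         lista.append((inicio[0], inicio[1], matriz[inicio[0]][inicio[1]]))
--
--         if inicio[0] < final[0]:
--             return ele_c_helper(matriz, (inicio[0] + 1, inicio[1]), final, lista)
--         elif inicio[1] < final[1]:
--             return ele_c_helper(matriz, (inicio[0], inicio[1] + 1), final, lista)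
-- ===== SOURCE B (Python) =====
-- def ele_c_helper(matriz, inicio, final, lista):
--     # Return value only: like A, mutates `lista` in place (extend = A's repeated appends
--     # on the inputs the claim covers) and returns it; None signals there is no
--     # down-then-right path from inicio to final, as in A.
--     (r0, c0), (fr, fc) = inicio, final
--     if fr < r0 or fc < c0:
--         return None
--     lista.extend((r, c0, matriz[r][c0]) for r in range(r0, fr))
--     lista.extend((fr, c, matriz[fr][c]) for c in range(c0, fc))
--     return lista
-- ===== Notes on version B (the rewrite author's own statement) =====
-- stated objective: simpler
-- what changed: Replaces A's tail recursion with a state tuple by directly materialising the two straight path segments (down the start column, then right along the final row) as two range comprehensions extended onto lista.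
-- outside the precondition, e.g. on ele_c_helper([[-1], [-2]], (-2, -1), (-1, -2), []): A returns None, B returns None
import Mathlib
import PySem

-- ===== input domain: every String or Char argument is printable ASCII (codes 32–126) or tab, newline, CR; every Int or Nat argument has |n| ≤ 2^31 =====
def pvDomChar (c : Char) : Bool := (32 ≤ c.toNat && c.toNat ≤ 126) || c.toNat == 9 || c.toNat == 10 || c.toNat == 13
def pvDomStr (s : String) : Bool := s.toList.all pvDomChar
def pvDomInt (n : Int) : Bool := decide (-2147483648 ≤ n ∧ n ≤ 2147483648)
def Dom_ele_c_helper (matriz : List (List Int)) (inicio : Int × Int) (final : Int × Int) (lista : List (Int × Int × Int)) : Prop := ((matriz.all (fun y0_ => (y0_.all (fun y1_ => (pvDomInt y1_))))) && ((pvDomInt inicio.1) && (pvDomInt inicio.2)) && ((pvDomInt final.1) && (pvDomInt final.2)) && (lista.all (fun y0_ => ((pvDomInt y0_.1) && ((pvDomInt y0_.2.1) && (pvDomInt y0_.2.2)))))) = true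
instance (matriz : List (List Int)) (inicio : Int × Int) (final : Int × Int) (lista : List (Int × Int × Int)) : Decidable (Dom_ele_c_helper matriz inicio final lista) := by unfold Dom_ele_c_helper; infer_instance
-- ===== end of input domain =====

-- B builds the two straight path segments with range comprehensions instead of A's tail
-- recursion; return-value equivalence only (both Pythons mutate `lista` in place).


-- matriz[r][c] as Python computes it (negative indices wrap); the `.getD 0` default is
-- read only on IndexError inputs, which Pre_ excludes.
def pvCell (matriz : List (List Int)) (r c : Int) : Int :=
  (PySem.List.pyGet? ((PySem.List.pyGet? matriz r).getD []) c).getD 0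

-- ===== PORT A =====
def ele_c_helper (matriz : List (List Int)) (inicio : Int × Int) (final : Int × Int) (lista : List (Int × Int × Int)) : List (Int × Int × Int) :=
  if inicio = final then lista
  else
    let lista' := lista ++ [(inicio.1, inicio.2, pvCell matriz inicio.1 inicio.2)]
    if inicio.1 < final.1 then ele_c_helper matriz (inicio.1 + 1, inicio.2) final lista'
    else if inicio.2 < final.2 then ele_c_helper matriz (inicio.1, inicio.2 + 1) final lista'
    else lista'  -- Python A returns None (no value of the type) here; excluded by Pre_
termination_by ((final.1 - inicio.1).toNat + (final.2 - inicio.2).toNat)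
decreasing_by
  · omega
  · omega

-- ===== PORT B =====
def ele_c_helper_alt (matriz : List (List Int)) (inicio : Int × Int) (final : Int × Int) (lista : List (Int × Int × Int)) : List (Int × Int × Int) :=
  if final.1 < inicio.1 ∨ final.2 < inicio.2 then lista  -- Python B returns None (no value of the type) here; excluded by Pre_
  else
    (lista ++ (PySem.List.pyRange inicio.1 final.1 1).map
        (fun r => (r, inicio.2, pvCell matriz r inicio.2)))
      ++ (PySem.List.pyRange inicio.2 final.2 1).map
        (fun c => (final.1, c, pvCell matriz final.1 c))

-- ===== PRECONDITION & SPEC =====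
def pvCellOk (matriz : List (List Int)) (r c : Int) : Bool :=
  (PySem.List.pyGet? ((PySem.List.pyGet? matriz r).getD []) c).isSome

-- Pre_ is exactly the inputs on which Python A returns a list: the start must not be past
-- the end (otherwise A falls off both branches and returns None, not a list) and every
-- cell A visits — (r, inicio.2) going down, then (final.1, c) going right — must be a
-- valid (possibly negative, Python-style) index, otherwise A raises IndexError.
-- (The two bound conjuncts are implied by the cell checks at the range endpoints; they are
-- stated so the condition short-circuits instead of enumerating a huge range.)
def Pre_ele_c_helper (matriz : List (List Int)) (inicio : Int × Int) (final : Int × Int) (lista : List (Int × Int × Int)) : Prop :=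
  inicio.1 ≤ final.1 ∧ inicio.2 ≤ final.2 ∧
  (inicio.1 < final.1 →
    -(matriz.length : Int) ≤ inicio.1 ∧ final.1 ≤ (matriz.length : Int) ∧
    ∀ r ∈ PySem.List.pyRange inicio.1 final.1 1, pvCellOk matriz r inicio.2 = true) ∧
  (inicio.2 < final.2 →
    -((((PySem.List.pyGet? matriz final.1).getD []).length : Int)) ≤ inicio.2 ∧
    final.2 ≤ ((((PySem.List.pyGet? matriz final.1).getD []).length : Int)) ∧
    ∀ c ∈ PySem.List.pyRange inicio.2 final.2 1, pvCellOk matriz final.1 c = true)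
instance (matriz : List (List Int)) (inicio : Int × Int) (final : Int × Int) (lista : List (Int × Int × Int)) : Decidable (Pre_ele_c_helper matriz inicio final lista) := by unfold Pre_ele_c_helper; infer_instance

def pvWitness_ele_c_helper : List (List Int) × (Int × Int) × (Int × Int) × (List (Int × Int × Int)) :=
  ([[1, 2], [3, 4]], (0, 0), (1, 1), [])

def Spec_ele_c_helper (matriz : List (List Int)) (inicio : Int × Int) (final : Int × Int) (lista : List (Int × Int × Int)) (out : List (Int × Int × Int)) : Prop := out = ele_c_helper_alt matriz inicio final lista
instance (matriz : List (List Int)) (inicio : Int × Int) (final : Int × Int) (lista : List (Int × Int × Int)) (out : List (Int × Int × Int)) : Decidable (Spec_ele_c_helper matriz inicio final lista out) := by unfold Spec_ele_c_helper; infer_instance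

-- ===== CLAIM (what is proved, stated in full; the proofs are below) =====
def Claim_equal_ele_c_helper : Prop := ∀ (matriz : List (List Int)) (inicio : Int × Int) (final : Int × Int) (lista : List (Int × Int × Int)), Dom_ele_c_helper matriz inicio final lista → Pre_ele_c_helper matriz inicio final lista → Spec_ele_c_helper matriz inicio final lista (ele_c_helper matriz inicio final lista)

-- ===== LEMMAS AND PROOFS =====

-- On reachable inputs B's guard is dead and B is the two mapped segments.
lemma alt_of_le (m : List (List Int)) (r0 c0 fr fc : Int) (l : List (Int × Int × Int))
    (h1 : r0 ≤ fr) (h2 : c0 ≤ fc) :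
    ele_c_helper_alt m (r0, c0) (fr, fc) l =
      (l ++ (PySem.List.pyRange r0 fr 1).map (fun r => (r, c0, pvCell m r c0)))
        ++ (PySem.List.pyRange c0 fc 1).map (fun c => (fr, c, pvCell m fr c)) := by
  simp only [ele_c_helper_alt]
  rw [if_neg (by omega : ¬((fr, fc).1 < (r0, c0).1 ∨ (fr, fc).2 < (r0, c0).2))]

-- B absorbs one down-step of A: appending the visited cell and advancing the row gives the same list.
lemma alt_step_down (m : List (List Int)) (r0 c0 fr fc : Int) (l : List (Int × Int × Int)) (h : r0 < fr)
    (h2 : c0 ≤ fc) :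
    ele_c_helper_alt m (r0 + 1, c0) (fr, fc) (l ++ [(r0, c0, pvCell m r0 c0)]) =
      ele_c_helper_alt m (r0, c0) (fr, fc) l := by
  rw [alt_of_le m (r0 + 1) c0 fr fc _ (by omega) h2, alt_of_le m r0 c0 fr fc l (by omega) h2]
  rw [PySem.List.pyRange_one_cons h]
  simp

-- B absorbs one right-step of A (taken only on the final row).
lemma alt_step_right (m : List (List Int)) (r0 c0 fc : Int) (l : List (Int × Int × Int)) (h : c0 < fc) :
    ele_c_helper_alt m (r0, c0 + 1) (r0, fc) (l ++ [(r0, c0, pvCell m r0 c0)]) =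
      ele_c_helper_alt m (r0, c0) (r0, fc) l := by
  rw [alt_of_le m r0 (c0 + 1) r0 fc _ le_rfl (by omega), alt_of_le m r0 c0 r0 fc l le_rfl (by omega)]
  rw [PySem.List.pyRange_one_eq_nil (le_refl r0), PySem.List.pyRange_one_cons h]
  simp

lemma ele_c_helper_eq_alt_aux (n : Nat) :
    ∀ (matriz : List (List Int)) (inicio final : Int × Int) (lista : List (Int × Int × Int)),
    (final.1 - inicio.1).toNat + (final.2 - inicio.2).toNat = n →
    Pre_ele_c_helper matriz inicio final lista →
    ele_c_helper matriz inicio final lista = ele_c_helper_alt matriz inicio final lista := by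
  induction n using Nat.strong_induction_on with
  | _ n IH =>
    rintro m ⟨r0, c0⟩ ⟨fr, fc⟩ l hn ⟨h1, h2, hdown, hright⟩
    rw [ele_c_helper]
    by_cases heq : ((r0, c0) : Int × Int) = (fr, fc)
    · rw [if_pos heq]
      obtain ⟨hr, hc⟩ := Prod.mk.injEq .. ▸ heq
      subst hr hc
      rw [alt_of_le m r0 c0 r0 c0 l le_rfl le_rfl]
      simp [PySem.List.pyRange_one_eq_nil le_rfl]
    · rw [if_neg heq]
      by_cases hlt : r0 < fr
      · rw [if_pos hlt]
        rw [IH _ (by simp at hn ⊢; omega) m (r0 + 1, c0) (fr, fc) _ rfl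
            ⟨by simpa using (by omega : r0 + 1 ≤ fr), h2, ?_, hright⟩]
        · exact alt_step_down m r0 c0 fr fc l hlt h2
        · intro hlt2
          obtain ⟨hb1, hb2, hall⟩ := hdown hlt
          refine ⟨by omega, hb2, fun r hr => hall r ?_⟩
          rw [PySem.List.mem_pyRange_one] at hr ⊢
          omega
      · have hre : r0 = fr := by omega
        subst hre
        by_cases hlc : c0 < fc
        · rw [if_neg hlt, if_pos hlc]
          rw [IH _ (by simp at hn ⊢; omega) m (r0, c0 + 1) (r0, fc) _ rfl
              ⟨le_rfl, by simpa using (by omega : c0 + 1 ≤ fc), ?_, ?_⟩]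
          · exact alt_step_right m r0 c0 fc l hlc
          · exact fun h => absurd h (lt_irrefl r0)
          · intro hlt2
            obtain ⟨hb1, hb2, hall⟩ := hright hlc
            refine ⟨by omega, hb2, fun c hc => hall c ?_⟩
            rw [PySem.List.mem_pyRange_one] at hc ⊢
            omega
        · exact absurd (by simp [Prod.ext_iff]; omega) heq

lemma ele_c_helper_eq_alt (matriz : List (List Int)) (inicio : Int × Int) (final : Int × Int) (lista : List (Int × Int × Int))
    (h : Pre_ele_c_helper matriz inicio final lista) :
    ele_c_helper matriz inicio final lista = ele_c_helper_alt matriz inicio final lista :=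
  ele_c_helper_eq_alt_aux _ matriz inicio final lista rfl h

-- ===== VERDICT (by name: the statement is the Claim_ definition above) =====
theorem ele_c_helper_spec : Claim_equal_ele_c_helper := by
  intro m i f l _ hpre
  exact ele_c_helper_eq_alt m i f l hpre
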